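-- pv_equiv track=rewrite | github.com/elbow-jason/addressor | piper/text_search.py | shinglize
-- ===== SOURCE A (Python) =====
-- def shinglize(word):
--     if len(word) < 3:
--         return [word]
--     shingles = []
--     for i in range(len(word)+3):
--         shingle = word[_zero_min(i-3):i]
--         if len(shingle) >= 2:
--             shingles.append(shingle)
--     return shingles
--
-- def _zero_min(i):
--     if i < 0:
--         return 0
--     return i
-- ===== SOURCE B (Python) =====
-- def shinglize(word):
--     if len(word) < 3:
--         return [word]
--     n = len(word)
--     return [word[:2]] + [word[i:i+3] for i in range(n - 2)] + [word[-2:]]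
-- ===== Notes on version B (the rewrite author's own statement) =====
-- stated objective: simpler
-- what changed: Replaced the single filtered sliding-window loop over range(len+3) with a direct three-part construction: the 2-char prefix, all 3-grams, and the 2-char suffix, with no length filter.
import Mathlib
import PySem

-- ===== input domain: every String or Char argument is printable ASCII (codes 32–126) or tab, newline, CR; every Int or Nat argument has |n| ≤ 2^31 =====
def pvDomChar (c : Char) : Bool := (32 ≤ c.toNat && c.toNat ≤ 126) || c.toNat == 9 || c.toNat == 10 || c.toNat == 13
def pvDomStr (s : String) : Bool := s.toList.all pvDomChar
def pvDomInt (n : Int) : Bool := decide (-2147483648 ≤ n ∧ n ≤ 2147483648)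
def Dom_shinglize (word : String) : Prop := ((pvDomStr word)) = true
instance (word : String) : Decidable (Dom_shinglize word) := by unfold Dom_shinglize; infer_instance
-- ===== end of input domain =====

-- ===== PORT A =====
-- B builds prefix + 3-grams + suffix directly instead of A's filtered sliding window (objective: simpler).
def pvZeroMin (i : Int) : Int := if i < 0 then 0 else i

def shinglize (word : String) : List String :=
  if PySem.Str.len word < 3 then [word]
  else
    (PySem.List.pyRange 0 (PySem.Str.len word + 3) 1).foldl
      (fun shingles i =>
        let shingle := PySem.Str.slice word (some (pvZeroMin (i - 3))) (some i)
        if 2 ≤ PySem.Str.len shingle then shingles ++ [shingle] else shingles)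
      []

-- ===== PORT B =====
def shinglize_alt (word : String) : List String :=
  let l := word.toList
  if l.length < 3 then [word]
  else
    String.ofList (l.take 2) ::
      ((List.range (l.length - 2)).map (fun i => String.ofList ((l.drop i).take 3))
        ++ [String.ofList (l.drop (l.length - 2))])

-- ===== PRECONDITION & SPEC =====
def Spec_shinglize (word : String) (out : List String) : Prop := out = shinglize_alt word
instance (word : String) (out : List String) : Decidable (Spec_shinglize word out) := by unfold Spec_shinglize; infer_instance

-- ===== CLAIM (what is proved, stated in full; the proofs are below) =====
def Claim_equal_shinglize : Prop := ∀ (word : String), Dom_shinglize word → Spec_shinglize word (shinglize word)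

-- ===== LEMMAS AND PROOFS =====

-- Slice of A's loop, expressed on the character list.
def pvShingleOf (l : List Char) (i : Int) : List Char :=
  PySem.List.slice l (some (pvZeroMin (i - 3))) (some i)

theorem pvShingleOf_take (l : List Char) (b : Nat) (hb : b ≤ 3) :
    pvShingleOf l (b : Int) = l.take b := by
  unfold pvShingleOf
  have hz : pvZeroMin ((b : Int) - 3) = 0 := by unfold pvZeroMin; split <;> omega
  rw [hz]
  simp [PySem.List.slice_to_natCast]

theorem pvShingleOf_natCast (l : List Char) (k : Nat) :
    pvShingleOf l ((k : Int) + 3) = (l.drop k).take 3 := by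
  unfold pvShingleOf pvZeroMin
  have h : (k : Int) + 3 - 3 = (k : Int) := by ring
  rw [h]
  split
  · omega
  · have : (k : Int) + 3 = ((k + 3 : Nat) : Int) := by push_cast; ring
    rw [this, PySem.List.slice_natCast]
    congr 1
    omega

-- ===== VERDICT (by name: the statement is the Claim_ definition above) =====
theorem shinglize_spec : Claim_equal_shinglize := by
  intro word _
  unfold Spec_shinglize shinglize shinglize_alt
  simp only []
  set l := word.toList with hl
  set n := l.length with hn
  by_cases h3 : n < 3
  · rw [if_pos (by simp [PySem.Str.len_eq, ← hl]; omega), if_pos h3]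
  · rw [if_neg (by simp [PySem.Str.len_eq, ← hl]; omega), if_neg h3]
    have hslice : ∀ (a b : Option Int),
        PySem.Str.slice word a b = String.ofList (PySem.List.slice l a b) := by
      intro a b; simp [PySem.Str.slice, hl]
    have hlen : ∀ cs : List Char, PySem.Str.len (String.ofList cs) = (cs.length : Int) := by
      intro cs; simp
    have hlw : PySem.Str.len word = (n : Int) := by simp [hl, hn]
    simp only [hslice, hlen, hlw]
    rw [show (fun (shingles : List String) (i : Int) =>
        if 2 ≤ ((PySem.List.slice l (some (pvZeroMin (i - 3))) (some i)).length : Int) then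
          shingles ++ [String.ofList (PySem.List.slice l (some (pvZeroMin (i - 3))) (some i))]
        else shingles) =
      (fun (shingles : List String) (i : Int) =>
        if 2 ≤ ((pvShingleOf l i).length : Int) then
          shingles ++ [String.ofList (pvShingleOf l i)]
        else shingles) from rfl]
    rw [PySem.List.foldl_append_ite]
    rw [PySem.List.pyRange_one_append 0 2 ((n : Int) + 3) (by omega) (by omega)]
    rw [PySem.List.pyRange_one_append 2 ((n : Int) + 1) ((n : Int) + 3) (by omega) (by omega)]
    have hP1 : PySem.List.pyRange 0 2 1 = [0, 1] := by decide
    have hP3 : PySem.List.pyRange ((n : Int) + 1) ((n : Int) + 3) 1 = [(n : Int) + 1, (n : Int) + 2] := by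
      rw [PySem.List.pyRange_one_cons (by omega), PySem.List.pyRange_one_cons (by omega),
        PySem.List.pyRange_one_eq_nil (by omega)]
      norm_num
      omega
    have hP2 : PySem.List.pyRange 2 ((n : Int) + 1) 1 =
        2 :: (List.range (n - 2)).map (fun (k : Nat) => ((k : Int) + 3)) := by
      rw [PySem.List.pyRange_one_cons (by omega)]
      norm_num
      rw [PySem.List.pyRange_one 3 ((n : Int) + 1)]
      have ht : (((n : Int) + 1 - 3)).toNat = n - 2 := by omega
      rw [ht]
      apply List.map_congr_left
      intro k _
      ring
    rw [hP1, hP2, hP3]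
    have e0 : pvShingleOf l 0 = l.take 0 := by
      have := pvShingleOf_take l 0 (by omega); norm_num at this ⊢; simpa using this
    have e1 : pvShingleOf l 1 = l.take 1 := by
      have := pvShingleOf_take l 1 (by omega); norm_num at this ⊢; simpa using this
    have e2 : pvShingleOf l 2 = l.take 2 := by
      have := pvShingleOf_take l 2 (by omega); norm_num at this ⊢; simpa using this
    have en1 : pvShingleOf l ((n : Int) + 1) = l.drop (n - 2) := by
      have hc : ((n : Int) + 1) = ((n - 2 : Nat) : Int) + 3 := by omega
      rw [hc, pvShingleOf_natCast]
      apply List.take_of_length_le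
      simp; omega
    have en2 : pvShingleOf l ((n : Int) + 2) = (l.drop (n - 1)).take 3 := by
      have hc : ((n : Int) + 2) = ((n - 1 : Nat) : Int) + 3 := by omega
      rw [hc, pvShingleOf_natCast]
    simp only [List.filter_append, List.map_append, List.filter_cons, List.filter_nil,
      e0, e1, e2, en1, en2]
    have hfull : (List.range (n - 2)).filter
        ((fun x => decide (2 ≤ ((pvShingleOf l x).length : Int))) ∘ fun (k : Nat) => (k : Int) + 3) =
        List.range (n - 2) := by
      apply List.filter_eq_self.mpr
      intro k hk
      rw [List.mem_range] at hk
      simp only [Function.comp_def, pvShingleOf_natCast]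
      simp
      omega
    rw [List.filter_map, hfull]
    have hlen0 : (l.take 0).length = 0 := by simp
    have hlen1 : (l.take 1).length = 1 := by simp; omega
    have hlen2 : (l.take 2).length = 2 := by simp; omega
    have hlend : (l.drop (n - 2)).length = 2 := by simp; omega
    have hlend1 : ((l.drop (n - 1)).take 3).length = 1 := by simp; omega
    simp only [hlen0, hlen1, hlen2, hlend, hlend1]
    norm_num
    exact ⟨by rw [e2], fun a _ => by rw [pvShingleOf_natCast], by rw [en1]⟩
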